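-- pv_equiv track=rewrite | github.com/Yawn-Sean/Daily_CF_Problems | daily_problems/2025/01/0131/personal_submission/cf1281b_liryc.py | solve
-- ===== SOURCE A (Python) =====
-- def solve(s: str, c: str) -> str:
--     t = s
--     for i, (a, b) in enumerate(zip(s, sorted(s))):
--         if b < a:
--             f = s.rindex(b)
--             t = s[:i] + b + s[i + 1:f] + a + s[f + 1:]
--             break
--     if t < c:
--         return t
--     else:
--         return "---"
-- ===== SOURCE B (Python) =====
-- def solve(s: str, c: str) -> str:
--     t = s
--     n = len(s)
--     # one right-to-left pass: suff[i] = (min of s[i:], last index of that min in s[i:])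
--     suff = [None] * n
--     best = ''
--     bp = -1
--     for i in range(n - 1, -1, -1):
--         if bp < 0 or s[i] < best:
--             best = s[i]
--             bp = i
--         suff[i] = (best, bp)
--     # one left-to-right pass: first position that can be improved, swap with the
--     # last occurrence of the suffix minimum
--     for i in range(n):
--         m, p = suff[i]
--         if m < s[i]:
--             l = list(s)
--             l[i] = m
--             l[p] = s[i]
--             t = "".join(l)
--             break
--     return t if t < c else "---"
-- ===== Notes on version B (the rewrite author's own statement) =====
-- stated objective: alternative
-- what changed: Replaces sorting the string and scanning it against the sorted copy plus an rindex re-scan by two linear passes: a right-to-left pass recording each suffix's minimum character and the last index attaining it, then a left-to-right pass that swaps at the first improvable position.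
import Mathlib
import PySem

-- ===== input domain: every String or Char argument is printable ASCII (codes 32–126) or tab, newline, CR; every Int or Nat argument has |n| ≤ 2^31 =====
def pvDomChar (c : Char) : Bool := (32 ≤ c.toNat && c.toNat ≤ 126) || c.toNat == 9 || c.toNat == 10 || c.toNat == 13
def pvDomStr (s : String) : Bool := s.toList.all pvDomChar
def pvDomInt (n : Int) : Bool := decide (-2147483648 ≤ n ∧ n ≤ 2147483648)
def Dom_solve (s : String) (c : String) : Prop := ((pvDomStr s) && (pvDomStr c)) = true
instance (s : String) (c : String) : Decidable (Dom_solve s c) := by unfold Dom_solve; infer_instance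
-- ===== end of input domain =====

-- B replaces sort + zip-scan + rindex by two linear passes (suffix minima, then first improvable
-- position); objective: alternative (an O(n) strategy instead of O(n log n); not measured faster in CPython).

-- ===== PORT A =====
-- the 'for i, (a, b) in enumerate(zip(s, sorted(s))): if b < a: break' loop
def pvScanA : List (Int × Char × Char) → Option (Int × Char × Char)
  | [] => none
  | (i, ab) :: rest => if ab.2 < ab.1 then some (i, ab.1, ab.2) else pvScanA rest

def solve (s : String) (c : String) : String :=
  let cs := s.toList
  let t : List Char :=
    match pvScanA (PySem.List.enumerate (cs.zip (PySem.List.sorted cs (fun x => x) false)) 0) with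
    | none => cs
    | some (i, a, b) =>
      -- s.rindex(b): here b always occurs in s (it comes from sorted(s)), so rindex = rfind
      let f : Int := PySem.Chars.rfind cs [b]
      PySem.List.slice cs none (some i) ++ [b] ++ PySem.List.slice cs (some (i + 1)) (some f)
        ++ [a] ++ PySem.List.slice cs (some (f + 1)) none
  if String.ofList t < c then String.ofList t else "---"

-- ===== PORT B =====
-- right-to-left pass: suff[i] = (min of s[i:], last index in s[i:] attaining it)
def pvSuffB : List Char → Nat → List (Char × Nat)
  | [], _ => []
  | x :: rest, i =>
    match pvSuffB rest (i + 1) with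
    | [] => [(x, i)]
    | (m, p) :: r => (if x < m then (x, i) else (m, p)) :: (m, p) :: r

-- left-to-right pass: break at the first i with suff[i].1 < s[i], swap positions i and suff[i].2
def pvScanB : List Char → List (Char × Nat) → Nat → Option (Nat × Char × Char × Nat)
  | ch :: rest, mp :: srest, i =>
      if mp.1 < ch then some (i, ch, mp.1, mp.2) else pvScanB rest srest (i + 1)
  | _, _, _ => none

def solve_alt (s : String) (c : String) : String :=
  let cs := s.toList
  let t : List Char :=
    match pvScanB cs (pvSuffB cs 0) 0 with
    | none => cs
    | some (i, ch, m, p) => (cs.set i m).set p ch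
  if String.ofList t < c then String.ofList t else "---"

-- ===== PRECONDITION & SPEC =====
def Spec_solve (s : String) (c : String) (out : String) : Prop := out = solve_alt s c
instance (s : String) (c : String) (out : String) : Decidable (Spec_solve s c out) := by unfold Spec_solve; infer_instance

-- ===== CLAIM (what is proved, stated in full; the proofs are below) =====
def Claim_equal_solve : Prop := ∀ (s : String) (c : String), Dom_solve s c → Spec_solve s c (solve s c)

-- ===== LEMMAS AND PROOFS =====

-- index of the LAST occurrence of b in l (proof-side reference function)
def pvLast : List Char → Char → Option Nat
  | [], _ => none
  | a :: l, b =>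
    match pvLast l b with
    | some k => some (k + 1)
    | none => if a = b then some 0 else none

lemma pvLast_lt {l : List Char} {b : Char} {k : Nat} (h : pvLast l b = some k) : k < l.length := by
  induction l generalizing k with
  | nil => simp [pvLast] at h
  | cons a t ih =>
    simp only [pvLast] at h
    cases ht : pvLast t b with
    | some k' =>
      rw [ht] at h
      injection h with h0
      have := ih ht
      simp only [List.length_cons]
      omega
    | none =>
      rw [ht] at h
      by_cases hab : a = b
      · rw [if_pos hab] at h
        injection h with h0
        simp only [List.length_cons]
        omega
      · rw [if_neg hab] at h
        exact absurd h (by simp)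

lemma pvLast_get {l : List Char} {b : Char} {k : Nat} (h : pvLast l b = some k) : l[k]? = some b := by
  induction l generalizing k with
  | nil => simp [pvLast] at h
  | cons a t ih =>
    simp only [pvLast] at h
    cases ht : pvLast t b with
    | some k' =>
      rw [ht] at h
      injection h with h0
      rw [← h0]
      simpa using ih ht
    | none =>
      rw [ht] at h
      by_cases hab : a = b
      · rw [if_pos hab] at h
        injection h with h0
        rw [← h0]
        simp [hab]
      · rw [if_neg hab] at h
        exact absurd h (by simp)

lemma pvLast_none {l : List Char} {b : Char} : pvLast l b = none ↔ b ∉ l := by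
  induction l with
  | nil => simp [pvLast]
  | cons a t ih =>
    simp only [pvLast]
    cases ht : pvLast t b with
    | some k' =>
      have hmem : b ∈ t := by
        by_contra hb
        exact absurd (ht.symm.trans (ih.mpr hb)) (by simp)
      simp [hmem]
    | none =>
      have hb : b ∉ t := ih.mp ht
      show (if a = b then some 0 else none) = none ↔ b ∉ a :: t
      split_ifs with hab
      · subst hab; simp
      · simp [List.mem_cons, hb]
        exact fun e => hab e.symm

lemma pvLast_append_right {suf : List Char} {b : Char} {k : Nat} (pre : List Char)
    (h : pvLast suf b = some k) : pvLast (pre ++ suf) b = some (pre.length + k) := by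
  induction pre with
  | nil => simpa using h
  | cons a t ih =>
    simp only [List.cons_append, pvLast, ih, List.length_cons]
    congr 1; omega

lemma pvLast_append_singleton (l : List Char) (x b : Char) :
    pvLast (l ++ [x]) b = if x = b then some l.length else pvLast l b := by
  induction l with
  | nil => simp [pvLast]
  | cons a t ih =>
    show (match pvLast (t ++ [x]) b with
          | some k => some (k + 1)
          | none => if a = b then some 0 else none)
        = if x = b then some (a :: t).length else pvLast (a :: t) b
    by_cases hxb : x = b
    · rw [ih, if_pos hxb, if_pos hxb]
      rfl
    · rw [ih, if_neg hxb, if_neg hxb]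
      rfl

lemma singleton_isPrefixOf (b : Char) (l : List Char) :
    ([b].isPrefixOf l = true) ↔ l[0]? = some b := by
  cases l with
  | nil => simp [List.isPrefixOf]
  | cons a t =>
    simp [List.isPrefixOf]
    exact eq_comm

lemma rfind_go_zero (s sub : List Char) :
    PySem.Chars.rfind.go s sub 0 = if sub.isPrefixOf s then 0 else -1 := by
  rw [PySem.Chars.rfind.go]

lemma rfind_go_succ (s sub : List Char) (j : Nat) :
    PySem.Chars.rfind.go s sub (j + 1)
      = if sub.isPrefixOf (s.drop (j + 1)) then (((j + 1 : Nat)) : Int)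
        else PySem.Chars.rfind.go s sub j := by
  rw [PySem.Chars.rfind.go]

lemma rfind_go_singleton (cs : List Char) (b : Char) :
    ∀ n, n ≤ cs.length →
      PySem.Chars.rfind.go cs [b] n = (pvLast (cs.take (n + 1)) b).elim (-1) (fun k => (k : Int)) := by
  intro n
  induction n with
  | zero =>
    intro _
    rw [rfind_go_zero]
    cases cs with
    | nil => simp [pvLast, List.isPrefixOf]
    | cons a t =>
      by_cases hab : a = b
      · subst hab; simp [List.isPrefixOf, pvLast]
      · have hba : b ≠ a := fun e => hab e.symm
        simp [List.isPrefixOf, pvLast, hab, hba]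
  | succ j ihj =>
    intro h
    rw [rfind_go_succ]
    rcases Nat.lt_or_ge (j + 1) cs.length with hlt | hge
    · have htake : cs.take (j + 1 + 1) = cs.take (j + 1) ++ [cs[j + 1]] := by
        rw [List.take_add_one, List.getElem?_eq_getElem hlt]; rfl
      have hpre : ([b].isPrefixOf (cs.drop (j + 1)) = true) ↔ cs[j + 1]? = some b := by
        rw [singleton_isPrefixOf]
        rw [List.getElem?_drop]
      rw [htake, pvLast_append_singleton]
      by_cases hb : cs[j + 1] = b
      · have hp : [b].isPrefixOf (cs.drop (j + 1)) = true :=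
          hpre.mpr (by rw [List.getElem?_eq_getElem hlt, hb])
        rw [if_pos hp, if_pos hb]
        simp [List.length_take, Nat.min_eq_left (Nat.le_of_lt hlt)]
      · have h1 : ¬ ([b].isPrefixOf (cs.drop (j + 1)) = true) := by
          rw [hpre, List.getElem?_eq_getElem hlt]
          simp [hb]
        rw [if_neg h1, if_neg hb]
        exact ihj (by omega)
    · have hdrop : cs.drop (j + 1) = [] := by
        rw [List.drop_eq_nil_iff]; omega
      have h1 : ¬ ([b].isPrefixOf (cs.drop (j + 1)) = true) := by
        rw [hdrop]; simp [List.isPrefixOf]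
      rw [if_neg h1]
      have e : cs.take (j + 1 + 1) = cs.take (j + 1) := by
        rw [List.take_of_length_le (by omega), List.take_of_length_le (by omega)]
      rw [e]
      exact ihj (by omega)

lemma rfind_singleton (cs : List Char) (b : Char) :
    PySem.Chars.rfind cs [b] = (pvLast cs b).elim (-1) (fun k => (k : Int)) := by
  have h0 : PySem.Chars.rfind cs [b] = PySem.Chars.rfind.go cs [b] cs.length := rfl
  rw [h0, rfind_go_singleton cs b cs.length le_rfl, List.take_of_length_le (by omega)]

-- head of pvSuffB is (minimum of the suffix, base index + its last occurrence)
lemma pvSuffB_spec (x : Char) (rest : List Char) (n : Nat) :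
    ∃ m k r, pvSuffB (x :: rest) n = (m, n + k) :: r ∧ r = pvSuffB rest (n + 1) ∧
      (∀ y ∈ x :: rest, m ≤ y) ∧ m ∈ x :: rest ∧ pvLast (x :: rest) m = some k := by
  induction rest generalizing x n with
  | nil =>
    refine ⟨x, 0, [], by simp [pvSuffB], by simp [pvSuffB], ?_, by simp, by simp [pvLast]⟩
    intro y hy; simp at hy; exact hy.ge
  | cons y rs ih =>
    obtain ⟨m', k', r', hEq, hr', hmin', hmem', hlast'⟩ := ih y (n + 1)
    by_cases hx : x < m'
    · refine ⟨x, 0, (m', n + 1 + k') :: r', ?_, ?_, ?_, List.mem_cons_self, ?_⟩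
      · show (match pvSuffB (y :: rs) (n + 1) with
              | [] => [(x, n)]
              | (m, p) :: r => (if x < m then (x, n) else (m, p)) :: (m, p) :: r) = _
        rw [hEq]
        simp [hx]
      · rw [hEq]
      · intro z hz
        rcases List.mem_cons.mp hz with h | h
        · exact h ▸ le_refl x
        · exact le_of_lt (lt_of_lt_of_le hx (hmin' z h))
      · have hnotin : x ∉ y :: rs := by
          intro hmem
          exact absurd (hmin' x hmem) (not_le.mpr hx)
        show (match pvLast (y :: rs) x with
              | some k => some (k + 1)
              | none => if x = x then some 0 else none) = some 0
        rw [pvLast_none.mpr hnotin]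
        simp
    · have hm'x : m' ≤ x := not_lt.mp hx
      refine ⟨m', k' + 1, (m', n + 1 + k') :: r', ?_, ?_, ?_, List.mem_cons_of_mem x hmem', ?_⟩
      · show (match pvSuffB (y :: rs) (n + 1) with
              | [] => [(x, n)]
              | (m, p) :: r => (if x < m then (x, n) else (m, p)) :: (m, p) :: r) = _
        rw [hEq]
        have e : n + 1 + k' = n + (k' + 1) := by omega
        simp [hx, e]
      · rw [hEq]
      · intro z hz
        rcases List.mem_cons.mp hz with h | h
        · exact h ▸ hm'x
        · exact hmin' z h
      · show (match pvLast (y :: rs) m' with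
              | some k => some (k + 1)
              | none => if x = m' then some 0 else none) = some (k' + 1)
        rw [hlast']

-- a minimal first element can be peeled off Python's sorted
lemma sorted_cons_min (x : Char) (rest : List Char) (h : ∀ y ∈ rest, x ≤ y) :
    PySem.List.sorted (x :: rest) (fun y => y) false
      = x :: PySem.List.sorted rest (fun y => y) false := by
  apply PySem.List.eq_of_perm_of_pairwise_le_of_injective (fun y => y) (fun a b hab => hab)
  · exact (PySem.List.sorted_perm _ _ _).trans
      ((List.Perm.cons x (PySem.List.sorted_perm rest _ _)).symm)
  · exact PySem.List.sorted_pairwise _ _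
  · rw [List.pairwise_cons]
    exact ⟨fun z hz => h z ((PySem.List.mem_sorted _ _ _ _).mp hz), PySem.List.sorted_pairwise _ _⟩

-- MAIN: the two scans agree
lemma pv_scan_agree (cs : List Char) (n : Nat) :
    (pvScanA (PySem.List.enumerate (cs.zip (PySem.List.sorted cs (fun x => x) false)) (n : Int)) = none
       ∧ pvScanB cs (pvSuffB cs n) n = none)
  ∨ ∃ j x m k, j < cs.length ∧ cs[j]? = some x ∧ m < x
      ∧ pvLast (cs.drop j) m = some k
      ∧ pvScanA (PySem.List.enumerate (cs.zip (PySem.List.sorted cs (fun x => x) false)) (n : Int))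
          = some (((n + j : Nat) : Int), x, m)
      ∧ pvScanB cs (pvSuffB cs n) n = some (n + j, x, m, n + j + k) := by
  induction cs generalizing n with
  | nil =>
    left
    constructor
    · rw [(PySem.List.sorted_eq_nil_iff ([] : List Char) (fun x => x) false).mpr rfl]
      simp [pvScanA, PySem.List.enumerate_nil]
    · simp [pvScanB]
  | cons x rest ih =>
    obtain ⟨m0, k0, r0, hEq, hr0, hmin0, hmem0, hlast0⟩ := pvSuffB_spec x rest n
    by_cases hall : ∀ y ∈ rest, x ≤ y
    · have hnm : ¬ m0 < x := by
        rcases List.mem_cons.mp hmem0 with h | h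
        · exact h ▸ lt_irrefl x
        · exact not_lt.mpr (hall m0 h)
      have hA' : pvScanA (PySem.List.enumerate
            ((x :: rest).zip (PySem.List.sorted (x :: rest) (fun z => z) false)) (n : Int))
          = pvScanA (PySem.List.enumerate
            (rest.zip (PySem.List.sorted rest (fun z => z) false)) ((n : Int) + 1)) := by
        rw [sorted_cons_min x rest hall, List.zip_cons_cons, PySem.List.enumerate_cons]
        simp [pvScanA]
      have hB' : pvScanB (x :: rest) (pvSuffB (x :: rest) n) n
          = pvScanB rest (pvSuffB rest (n + 1)) (n + 1) := by
        rw [hEq, ← hr0]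
        simp [pvScanB, hnm]

      have hcast : ((n : Int) + 1) = (((n + 1 : Nat)) : Int) := by push_cast; ring
      rcases ih (n + 1) with ⟨ha, hb⟩ | ⟨j, x', m, k, hj, hx, hmx, hlast, ha, hb⟩
      · left
        exact ⟨by rw [hA', hcast, ha], by rw [hB', hb]⟩
      · right
        refine ⟨j + 1, x', m, k, by simpa using Nat.succ_lt_succ hj, by simpa using hx, hmx,
          by simpa using hlast, ?_, ?_⟩
        · rw [hA', hcast, ha]
          have e : n + 1 + j = n + (j + 1) := by omega
          rw [e]
        · rw [hB', hb]
          have e : n + 1 + j = n + (j + 1) := by omega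
          rw [e]
    · rw [not_forall] at hall
      obtain ⟨y, hall2⟩ := hall
      rw [Classical.not_imp] at hall2
      obtain ⟨hy, hyx'⟩ := hall2
      have hyx : y < x := not_le.mp hyx'
      have hne : PySem.List.sorted (x :: rest) (fun z => z) false ≠ [] := by
        rw [Ne, PySem.List.sorted_eq_nil_iff]; simp
      obtain ⟨m1, t1, hsrt⟩ := List.exists_cons_of_ne_nil hne
      have hmin1 : ∀ z ∈ x :: rest, m1 ≤ z :=
        PySem.List.key_head_sorted_le (x :: rest) (fun z => z) hsrt
      have hm1mem : m1 ∈ x :: rest :=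
        (PySem.List.mem_sorted _ _ _ _).mp (hsrt ▸ List.mem_cons_self)
      have hm01 : m0 = m1 := le_antisymm (hmin0 m1 hm1mem) (hmin1 m0 hmem0)
      subst hm01
      have hm1x : m0 < x := lt_of_le_of_lt (hmin1 y (List.mem_cons_of_mem _ hy)) hyx
      right
      refine ⟨0, x, m0, k0, by simp, by simp, hm1x, by simpa using hlast0, ?_, ?_⟩
      · rw [hsrt, List.zip_cons_cons, PySem.List.enumerate_cons]
        simp [pvScanA, hm1x]
      · rw [hEq]
        simp [pvScanB, hm1x]

-- two set's at j < j + k expressed as the slice concatenation A builds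
lemma set_set_build (cs : List Char) (j k : Nat) (m x : Char) (hk : 1 ≤ k)
    (hlt : j + k < cs.length) :
    (cs.set j m).set (j + k) x
      = cs.take j ++ [m] ++ (cs.drop (j + 1)).take (j + k - (j + 1)) ++ [x]
          ++ cs.drop (j + k + 1) := by
  have h1 : j + k < (cs.set j m).length := by simpa using hlt
  rw [List.set_eq_take_cons_drop x h1]
  rw [List.drop_set_of_lt (show j < j + k + 1 by omega)]
  rw [List.take_set]
  have h2 : j < (cs.take (j + k)).length := by
    rw [List.length_take]; omega
  rw [List.set_eq_take_cons_drop m h2]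
  rw [List.take_take, Nat.min_eq_left (by omega), List.drop_take]
  simp [List.append_assoc]

-- ===== VERDICT (by name: the statement is the Claim_ definition above) =====
theorem solve_spec : Claim_equal_solve := by
  unfold Claim_equal_solve
  intro s c _
  unfold Spec_solve solve solve_alt
  rcases pv_scan_agree s.toList 0 with ⟨hA, hB⟩ | ⟨j, x, m, k, hj, hx, hmx, hlast, hA, hB⟩
  · simp only [Nat.cast_zero] at hA
    simp only [hA, hB]
  · simp only [Nat.cast_zero, Nat.zero_add] at hA hB
    have hk1 : 1 ≤ k := by
      by_contra hk0
      have hk : k = 0 := by omega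
      subst hk
      have := pvLast_get hlast
      have e : (s.toList.drop j)[0]? = s.toList[j]? := by
        rw [List.getElem?_drop]
        simp
      rw [e, hx] at this
      simp at this
      exact absurd (this ▸ hmx) (lt_irrefl x)
    have hjk : j + k < s.toList.length := by
      have := pvLast_lt hlast
      rw [List.length_drop] at this
      omega
    have hlastfull : pvLast s.toList m = some (j + k) := by
      have h := pvLast_append_right (s.toList.take j) hlast
      rw [List.take_append_drop] at h
      rwa [List.length_take, Nat.min_eq_left (le_of_lt hj)] at h
    have hf : PySem.Chars.rfind s.toList [m] = ((j + k : Nat) : Int) := by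
      rw [rfind_singleton, hlastfull]; rfl
    simp only [hA, hB, hf]
    have hc1 : ((j : Int) + 1) = (((j + 1 : Nat)) : Int) := by push_cast; ring
    have hc2 : (((j + k : Nat) : Int) + 1) = (((j + k + 1 : Nat)) : Int) := by push_cast; ring
    rw [hc1, hc2, PySem.List.slice_to_natCast, PySem.List.slice_natCast,
      PySem.List.slice_from_natCast, set_set_build s.toList j k m x hk1 hjk]
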